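-- pv_equiv track=rewrite | github.com/ViktoriaMolochii/nlp_diploma | form_dataset_for_training.py | char_to_word_index
-- ===== SOURCE A (Python) =====
-- def char_to_word_index(s: str, char_index: int) -> int:
--     """Return index of a word corresponding to a character position. """
--     pos = -1
--     word_index = -1
--     while (pos := s.find(" ", pos + 1)) != -1:
--         word_index += 1
--         if pos >= char_index:
--             return word_index
--     return word_index + 1
-- ===== SOURCE B (Python) =====
-- def char_to_word_index(s: str, char_index: int) -> int:
--     """Return index of a word corresponding to a character position. """
--     count = 0
--     for i, ch in enumerate(s):
--         if i >= char_index: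
--             break
--         if ch == " ":
--             count += 1
--     return count
-- ===== Notes on version B (the rewrite author's own statement) =====
-- stated objective: simpler
-- what changed: Replaces the repeated str.find hopping between space occurrences (with -1 sentinel and word_index bookkeeping) by a single linear scan over characters that counts spaces before char_index.
import Mathlib
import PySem

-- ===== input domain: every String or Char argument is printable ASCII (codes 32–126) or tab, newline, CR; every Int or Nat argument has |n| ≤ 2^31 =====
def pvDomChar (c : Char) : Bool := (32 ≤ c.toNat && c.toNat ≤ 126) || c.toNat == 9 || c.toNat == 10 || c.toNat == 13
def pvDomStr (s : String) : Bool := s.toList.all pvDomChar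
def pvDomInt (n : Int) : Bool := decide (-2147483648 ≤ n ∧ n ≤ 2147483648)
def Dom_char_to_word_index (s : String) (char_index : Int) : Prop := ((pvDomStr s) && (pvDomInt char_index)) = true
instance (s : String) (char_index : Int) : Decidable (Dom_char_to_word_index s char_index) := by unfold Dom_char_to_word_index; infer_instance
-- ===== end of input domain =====

-- ===== PORT A =====
-- A's while-loop: pos hops between space occurrences via s.find(" ", pos+1); the
-- `start ≤ l.length` proof argument only justifies termination, it changes no value.
def pvLoopA (l : List Char) (ci : Int) (start : Nat) (hs : start ≤ l.length) (w : Int) : Int :=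
  let pos := PySem.Chars.findFrom l [' '] (start : Int) none
  if hpos : pos = -1 then
    w + 1
  else
    if pos ≥ ci then
      w + 1
    else
      have spec := PySem.Chars.findFrom_natCast_spec l [' '] start hs hpos
      have hlt : pos.toNat < l.length := by
        have h3 := spec.2.1.length_le
        simp at h3
        omega
      pvLoopA l ci (pos.toNat + 1) (by omega) (w + 1)
termination_by l.length - start
decreasing_by
  omega

def char_to_word_index (s : String) (char_index : Int) : Int :=
  pvLoopA s.toList char_index 0 (Nat.zero_le _) (-1)

-- ===== PORT B =====
-- B's for-loop over enumerate(s) with: break at i ≥ char_index, count spaces.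
def pvLoopB (l : List Char) (i : Int) (ci : Int) (count : Int) : Int :=
  match l with
  | [] => count
  | ch :: rest =>
    if i ≥ ci then count
    else pvLoopB rest (i + 1) ci (if ch = ' ' then count + 1 else count)

def char_to_word_index_alt (s : String) (char_index : Int) : Int :=
  pvLoopB s.toList 0 char_index 0

-- ===== PRECONDITION & SPEC =====
def Spec_char_to_word_index (s : String) (char_index : Int) (out : Int) : Prop := out = char_to_word_index_alt s char_index
instance (s : String) (char_index : Int) (out : Int) : Decidable (Spec_char_to_word_index s char_index out) := by unfold Spec_char_to_word_index; infer_instance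

-- ===== CLAIM (what is proved, stated in full; the proofs are below) =====
def Claim_equal_char_to_word_index : Prop := ∀ (s : String) (char_index : Int), Dom_char_to_word_index s char_index → Spec_char_to_word_index s char_index (char_to_word_index s char_index)

-- ===== LEMMAS AND PROOFS =====

-- number of spaces among the characters of xs, as an Int
def pvCountSp (xs : List Char) : Int := (xs.count ' ' : Int)

theorem pv_singleton_prefix {a : Char} {xs : List Char} :
    [a] <+: xs ↔ ∃ ys, xs = a :: ys := by
  constructor
  · rintro ⟨t, rfl⟩; exact ⟨t, rfl⟩
  · rintro ⟨ys, rfl⟩; exact ⟨ys, rfl⟩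

theorem pv_singleton_infix {a : Char} {xs : List Char} : [a] <:+: xs ↔ a ∈ xs := by
  constructor
  · intro h; exact h.subset (by simp)
  · intro h
    obtain ⟨s, t, hst⟩ := List.append_of_mem h
    exact ⟨s, t, by rw [hst]; simp⟩

-- a space inside the segment take t (drop start) sits at an absolute position p
theorem pv_mem_seg {l : List Char} {start t : Nat}
    (h : ' ' ∈ (l.drop start).take t) :
    ∃ p, start ≤ p ∧ p < start + t ∧ p < l.length ∧ [' '] <+: l.drop p := by
  obtain ⟨j, hj, hget⟩ := List.getElem_of_mem h
  have hj' : j < t ∧ j < l.length - start := by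
    simpa [List.length_take, Nat.lt_min] using hj
  have hlen : start + j < l.length := by omega
  refine ⟨start + j, by omega, by omega, hlen, ?_⟩
  rw [pv_singleton_prefix]
  refine ⟨l.drop (start + j + 1), ?_⟩
  rw [List.drop_eq_getElem_cons hlen]
  congr 1
  rw [List.getElem_take] at hget
  rw [← hget]
  simp

theorem pvLoopB_spec (l : List Char) (ci : Int) :
    ∀ (i count : Int), pvLoopB l i ci count = count + pvCountSp (l.take ((ci - i).toNat)) := by
  induction l with
  | nil => intro i count; simp [pvLoopB, pvCountSp]
  | cons ch rest ih =>
    intro i count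
    unfold pvLoopB
    by_cases h : i ≥ ci
    · have h0 : (ci - i).toNat = 0 := by omega
      simp [h, h0, pvCountSp]
    · have hn : (ci - i).toNat = (ci - (i + 1)).toNat + 1 := by omega
      rw [if_neg h, ih]
      by_cases hc : ch = ' ' <;> (simp [hc, hn, pvCountSp]; try ring)

theorem pvLoopA_spec (l : List Char) (ci : Int) :
    ∀ (n start : Nat) (hs : start ≤ l.length), l.length - start ≤ n → ∀ (w : Int),
      pvLoopA l ci start hs w = w + 1 + pvCountSp ((l.drop start).take ((ci - start).toNat)) := by
  intro n
  induction n with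
  | zero =>
    intro start hs hn w
    have hstart : start = l.length := by omega
    have hpos : PySem.Chars.findFrom l [' '] (start : Int) none = -1 := by
      rw [PySem.Chars.findFrom_natCast_eq_neg_one_iff l [' '] start hs]
      subst hstart
      simp
    rw [pvLoopA, dif_pos hpos]
    subst hstart
    simp [pvCountSp]
  | succ n ih =>
    intro start hs hn w
    rw [pvLoopA]
    by_cases hpos : PySem.Chars.findFrom l [' '] (start : Int) none = -1
    · -- no space at or after start
      rw [dif_pos hpos]
      have hno : ¬ [' '] <:+: l.drop start :=
        (PySem.Chars.findFrom_natCast_eq_neg_one_iff l [' '] start hs).mp hpos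
      have hmem : ' ' ∉ l.drop start := fun hm => hno (pv_singleton_infix.mpr hm)
      have hz : ' ' ∉ (l.drop start).take ((ci - start).toNat) :=
        fun hm => hmem (List.mem_of_mem_take hm)
      have hz2 : ' ' ∉ (l.drop start).take (ci.toNat - start) := by
        have he : ci.toNat - start = (ci - (start : Int)).toNat := by omega
        rwa [he]
      simp [pvCountSp, List.count_eq_zero.mpr hz2]
    · rw [dif_neg hpos]
      have spec := PySem.Chars.findFrom_natCast_spec l [' '] start hs hpos
      set pos := PySem.Chars.findFrom l [' '] (start : Int) none with hposdef
      have h1 : (start : Int) ≤ pos := spec.1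
      by_cases hge : pos ≥ ci
      · -- the first space at or after start already lies at or beyond ci
        rw [if_pos hge]
        have hz : ' ' ∉ (l.drop start).take ((ci - start).toNat) := by
          intro hm
          obtain ⟨p, hp1, hp2, hp3, hp4⟩ := pv_mem_seg hm
          exact spec.2.2 p hp1 (by omega) hp4
        have hz2 : ' ' ∉ (l.drop start).take (ci.toNat - start) := by
          have he : ci.toNat - start = (ci - (start : Int)).toNat := by omega
          rwa [he]
        simp [pvCountSp, List.count_eq_zero.mpr hz2]
      · rw [if_neg hge]
        have hlt : pos.toNat < l.length := by
          have h3 := spec.2.1.length_le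
          simp at h3
          omega
        rw [ih (pos.toNat + 1) (by omega) (by omega)]
        -- split the segment at the first space pos
        have hposlt : pos < ci := by omega
        set m : Nat := pos.toNat - start with hmdef
        have hposeq : pos.toNat = start + m := by omega
        have hgd : l[pos.toNat]'hlt = ' ' := by
          have h2 := spec.2.1
          rw [pv_singleton_prefix] at h2
          obtain ⟨ys, hys⟩ := h2
          rw [List.drop_eq_getElem_cons hlt] at hys
          exact (List.cons.injEq _ _ _ _ ▸ hys).1
        have hsplit : (l.drop start).take ((ci - start).toNat)
            = ((l.drop start).take m) ++ l[pos.toNat]'hlt ::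
                ((l.drop (pos.toNat + 1)).take ((ci - (pos.toNat + 1)).toNat)) := by
          have hds : l.drop start = ((l.drop start).take m) ++ (l.drop (start + m)) := by
            rw [← List.drop_drop]
            exact (List.take_append_drop m (l.drop start)).symm
          have hd2 : l.drop (start + m) = l[pos.toNat]'hlt :: l.drop (pos.toNat + 1) := by
            rw [← hposeq]
            exact List.drop_eq_getElem_cons hlt
          conv_lhs => rw [hds, hd2]
          rw [List.take_append]
          have hlen : ((l.drop start).take m).length = m := by simp; omega
          rw [hlen]
          congr 1
          · rw [List.take_take, Nat.min_eq_right (by omega)]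
          · have he : (ci - start).toNat - m = ((ci - (pos.toNat + 1)).toNat) + 1 := by omega
            rw [he, List.take_succ_cons]
        have hnosp : ' ' ∉ (l.drop start).take m := by
          intro hm
          obtain ⟨p, hp1, hp2, hp3, hp4⟩ := pv_mem_seg hm
          exact spec.2.2 p hp1 (by omega) hp4
        rw [hsplit]
        simp [pvCountSp, List.count_append, hgd,
          List.count_eq_zero.mpr hnosp]
        ring

-- ===== VERDICT (by name: the statement is the Claim_ definition above) =====
theorem char_to_word_index_spec : Claim_equal_char_to_word_index := by
  intro s ci _
  unfold Spec_char_to_word_index char_to_word_index char_to_word_index_alt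
  rw [pvLoopA_spec s.toList ci s.toList.length 0 (Nat.zero_le _) (by omega),
    pvLoopB_spec]
  simp [pvCountSp]
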